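-- pv_equiv track=rewrite | github.com/Bimi1804/Decl.-ASAG | python_files/classes.py | __alternate_response_check
-- ===== SOURCE A (Python) =====
-- def __alternate_response_check(act_a,act_b,processed_answer):
--     """
--     Checks if the answer fulfills Alternate Response[A,B]
--
--     Parameters
--     ----------
--     act_a : str
--         The actual text (word) of activity A
--     act_b : str
--         The actual text (word) of activity B
--     processed_answer : str[0..*]
--         the list of processed words of the answer
--
--     Returns
--     -------
--     True -> If the answer fulfills the constraint
--     False -> If the answer does not fulfill the constraint
--     """
--     # True if A not in the answer:
--     if act_a not in processed_answer:
--         return True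
--     # False if A in the answer but no B:
--     if act_a in processed_answer and act_b not in processed_answer:
--         return False
--     checking = processed_answer
--     # Check if every A is followed by B without A between:
--     while act_a in checking:
--         # False if no B in remaining answer:
--         if act_b not in checking:
--             return False
--         marker_a = checking.index(act_a)                # index of first A
--         marker_b = checking.index(act_b)                # index of first B
--         # False if B before A:
--         if marker_b < marker_a:
--             return False
--         # False if an A is between first A and first B
--         if act_a in checking[marker_a+1:marker_b]:
--             return False
--         checking.pop(marker_a)                          # remove first A
--         checking.pop(checking.index(act_b))             # remove first B
--     return True
-- ===== SOURCE B (Python) =====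
-- def __alternate_response_check(act_a, act_b, processed_answer):
--     # Single left-to-right pass: keep only the A/B tokens, then greedily
--     # consume "A B" pairs; the remainder must consist of B tokens only.
--     seq = [w for w in processed_answer if w == act_a or w == act_b]
--     i, n = 0, len(seq)
--     while i + 1 < n and seq[i] == act_a and seq[i + 1] == act_b:
--         i += 2
--     return all(w == act_b for w in seq[i:])
-- ===== Notes on version B (the rewrite author's own statement) =====
-- stated objective: alternative
-- what changed: A repeatedly rescans and mutates the list with 'in', list.index and pop inside a while-loop; B makes one pass keeping only the A/B tokens and then checks the filtered sequence is AB-pairs followed by trailing Bs.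
import Mathlib
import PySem

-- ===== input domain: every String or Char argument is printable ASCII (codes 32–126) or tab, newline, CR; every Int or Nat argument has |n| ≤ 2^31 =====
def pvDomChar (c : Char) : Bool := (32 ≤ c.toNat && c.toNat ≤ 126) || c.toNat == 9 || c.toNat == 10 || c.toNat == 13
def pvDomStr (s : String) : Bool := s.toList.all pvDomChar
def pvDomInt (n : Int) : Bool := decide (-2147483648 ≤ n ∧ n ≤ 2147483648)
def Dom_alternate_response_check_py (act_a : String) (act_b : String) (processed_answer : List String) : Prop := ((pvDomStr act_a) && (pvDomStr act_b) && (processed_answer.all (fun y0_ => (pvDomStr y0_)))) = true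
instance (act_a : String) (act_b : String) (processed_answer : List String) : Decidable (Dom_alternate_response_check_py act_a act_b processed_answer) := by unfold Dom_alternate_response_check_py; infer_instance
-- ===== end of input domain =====

-- B replaces A's index/pop while-loop over the mutating list by one filtering pass plus a
-- greedy pair scan; A mutates processed_answer in place (list.pop), B does not — the
-- equivalence proved here is about the return value only.


-- ===== PORT A =====
-- the 'while act_a in checking' loop; where Python's list.index would raise ValueError
-- (possible only outside Pre_) or an index were out of range (never), the port returns false.
def arcLoop (a b : String) (checking : List String) : Bool :=
  if a ∈ checking then
    if ¬ (b ∈ checking) then false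
    else
      match PySem.List.index? checking a with
      | none => false
      | some marker_a =>
        match PySem.List.index? checking b with
        | none => false
        | some marker_b =>
          if marker_b < marker_a then false
          else if a ∈ PySem.List.slice checking (some ((marker_a : Int) + 1)) (some (marker_b : Int)) then false
          else
            match h1 : PySem.List.pop? checking ((marker_a : Nat) : Int) with
            | none => false
            | some (_, c1) =>
              match PySem.List.index? c1 b with
              | none => false    -- Python raises ValueError here (outside Pre_)
              | some j =>
                match h2 : PySem.List.pop? c1 ((j : Nat) : Int) with
                | none => false
                | some (_, c2) => arcLoop a b c2
  else true
termination_by checking.length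
decreasing_by
  have l1 := PySem.List.length_of_pop?_eq_some _ h1
  have l2 := PySem.List.length_of_pop?_eq_some _ h2
  simp at l1 l2; omega

def alternate_response_check_py (act_a : String) (act_b : String) (processed_answer : List String) : Bool :=
  if ¬ (act_a ∈ processed_answer) then true
  else if act_a ∈ processed_answer ∧ ¬ (act_b ∈ processed_answer) then false
  else arcLoop act_a act_b processed_answer

-- ===== PORT B =====
-- Source B's greedy while-loop over the filtered list, as structural recursion
def pairLoop (a b : String) : List String → Bool
  | [] => true
  | [w] => w == b
  | w1 :: w2 :: rest =>
    if w1 == a && w2 == b then pairLoop a b rest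
    else (w1 :: w2 :: rest).all (fun w => w == b)

def alternate_response_check_py_alt (act_a : String) (act_b : String) (processed_answer : List String) : Bool :=
  pairLoop act_a act_b (processed_answer.filter (fun w => w == act_a || w == act_b))

-- ===== PRECONDITION & SPEC =====
-- Pre_ excludes only the inputs where A raises: when act_a == act_b and it occurs an odd
-- number of times in the answer, A's 'checking.index(act_b)' raises ValueError (B returns
-- True there).
def Pre_alternate_response_check_py (act_a : String) (act_b : String) (processed_answer : List String) : Prop :=
  ¬ (act_a = act_b ∧ PySem.List.count processed_answer act_a % 2 = 1)
instance (act_a : String) (act_b : String) (processed_answer : List String) : Decidable (Pre_alternate_response_check_py act_a act_b processed_answer) := by unfold Pre_alternate_response_check_py; infer_instance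

def pvWitness_alternate_response_check_py : String × String × List String :=
  ("a", "b", ["a", "x", "b", "a", "b", "b"])

def Spec_alternate_response_check_py (act_a : String) (act_b : String) (processed_answer : List String) (out : Bool) : Prop := out = alternate_response_check_py_alt act_a act_b processed_answer
instance (act_a : String) (act_b : String) (processed_answer : List String) (out : Bool) : Decidable (Spec_alternate_response_check_py act_a act_b processed_answer out) := by unfold Spec_alternate_response_check_py; infer_instance

-- ===== CLAIM (what is proved, stated in full; the proofs are below) =====
def Claim_equal_alternate_response_check_py : Prop := ∀ (act_a : String) (act_b : String) (processed_answer : List String), Dom_alternate_response_check_py act_a act_b processed_answer → Pre_alternate_response_check_py act_a act_b processed_answer → Spec_alternate_response_check_py act_a act_b processed_answer (alternate_response_check_py act_a act_b processed_answer)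

-- ===== LEMMAS AND PROOFS =====
theorem arcLoop_not_mem (a b : String) (l : List String) (ha : a ∉ l) :
    arcLoop a b l = true := by
  rw [arcLoop, if_neg ha]

theorem arcLoop_no_b (a b : String) (l : List String) (ha : a ∈ l) (hb : b ∉ l) :
    arcLoop a b l = false := by
  rw [arcLoop, if_pos ha, if_pos hb]

theorem arcLoop_b_first (a b : String) (l : List String) (ha : a ∈ l) (hb : b ∈ l)
    (ma mb : Nat) (hma : PySem.List.index? l a = some ma) (hmb : PySem.List.index? l b = some mb)
    (hlt : mb < ma) : arcLoop a b l = false := by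
  rw [arcLoop, if_pos ha, if_neg (not_not_intro hb), hma, hmb]
  simp only [if_pos hlt]

theorem arcLoop_a_between (a b : String) (l : List String) (ha : a ∈ l) (hb : b ∈ l)
    (ma mb : Nat) (hma : PySem.List.index? l a = some ma) (hmb : PySem.List.index? l b = some mb)
    (hlt : ¬ mb < ma)
    (hsl : a ∈ PySem.List.slice l (some ((ma : Int) + 1)) (some (mb : Int))) :
    arcLoop a b l = false := by
  rw [arcLoop, if_pos ha, if_neg (not_not_intro hb), hma, hmb]
  simp only [if_neg hlt, if_pos hsl]

theorem arcLoop_step (a b : String) (l : List String) (ha : a ∈ l) (hb : b ∈ l)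
    (ma mb : Nat) (hma : PySem.List.index? l a = some ma) (hmb : PySem.List.index? l b = some mb)
    (hlt : ¬ mb < ma)
    (hsl : a ∉ PySem.List.slice l (some ((ma : Int) + 1)) (some (mb : Int)))
    (x1 : String) (c1 : List String) (hp1 : PySem.List.pop? l ((ma : Nat) : Int) = some (x1, c1))
    (j : Nat) (hj : PySem.List.index? c1 b = some j)
    (x2 : String) (c2 : List String) (hp2 : PySem.List.pop? c1 ((j : Nat) : Int) = some (x2, c2)) :
    arcLoop a b l = arcLoop a b c2 := by
  rw [arcLoop, if_pos ha, if_neg (not_not_intro hb), hma, hmb]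
  simp only [if_neg hlt, if_neg hsl]
  split
  next h => rw [hp1] at h; cases h
  next x c h =>
    rw [hp1] at h
    injection h with h
    obtain ⟨rfl, rfl⟩ := Prod.mk.injEq .. ▸ h
    rw [hj]
    split
    next h' => cases h'
    next j' h' =>
      injection h' with h'
      subst h'
      split
      next h2 => rw [hp2] at h2; cases h2
      next x' c' h2 =>
        rw [hp2] at h2
        injection h2 with h2
        obtain ⟨rfl, rfl⟩ := Prod.mk.injEq .. ▸ h2
        rfl

theorem pairLoop_all_b (a b : String) (s : List String) (h : ∀ w ∈ s, w = b) :
    pairLoop a b s = true := by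
  induction s using pairLoop.induct a b with
  | case1 => simp [pairLoop]
  | case2 w => simp [pairLoop, h w (by simp)]
  | case3 w1 w2 rest hc ih =>
    rw [pairLoop, if_pos hc]
    exact ih fun w hw => h w (by simp [hw])
  | case4 w1 w2 rest hc =>
    rw [pairLoop, if_neg hc]
    simp only [List.all_eq_true, beq_iff_eq]
    exact h

theorem pairLoop_all_a (a b : String) (s : List String) (hne : a ≠ b)
    (hs : s ≠ []) (h : ∀ w ∈ s, w = a) : pairLoop a b s = false := by
  match s with
  | [] => exact absurd rfl hs
  | [w] => have := h w (by simp); subst this; simp [pairLoop, hne]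
  | w1 :: w2 :: rest =>
    have h1 := h w1 (by simp); have h2 := h w2 (by simp)
    subst h1; subst h2
    simp [pairLoop, hne]

theorem pairLoop_head_b (a b : String) (s : List String) (hne : a ≠ b)
    (ha : a ∈ s) : pairLoop a b (b :: s) = false := by
  match s with
  | [] => simp at ha
  | w :: rest =>
    have hba : (b == a) = false := by simp [Ne.symm hne]
    rw [pairLoop, if_neg (by simp [hba])]
    simp only [List.all_eq_false]
    exact ⟨a, by simp [ha], by simp [hne]⟩

theorem pairLoop_a_a (a b : String) (rest : List String) (hne : a ≠ b) :
    pairLoop a b (a :: a :: rest) = false := by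
  simp [pairLoop, hne]

theorem pairLoop_pair (a b : String) (rest : List String) :
    pairLoop a b (a :: b :: rest) = pairLoop a b rest := by
  simp [pairLoop]

def pred (a b : String) : String → Bool := fun w => w == a || w == b

theorem filter_pred_nil (a b : String) (u : List String) (hau : a ∉ u) (hbu : b ∉ u) :
    u.filter (pred a b) = [] := by
  rw [List.filter_eq_nil_iff]
  intro w hw
  simp only [pred, Bool.or_eq_true, beq_iff_eq, not_or]
  exact ⟨fun h => hau (h ▸ hw), fun h => hbu (h ▸ hw)⟩

theorem idx_mem_pre {v : String} {u t : List String} {m : Nat}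
    (h : PySem.List.index? (u ++ t) v = some m) (hv : v ∈ u) : m < u.length := by
  have e := PySem.List.index?_append_of_mem t hv
  rw [h] at e
  obtain ⟨p, s, hu, hpl, _⟩ := (PySem.List.index?_eq_some_iff u v m).mp e.symm
  subst hu
  simp only [List.length_append, List.length_cons]
  omega

theorem slice_middle (u v t : List String) (x : String) :
    PySem.List.slice (u ++ x :: (v ++ t)) (some ((u.length : Int) + 1)) (some ((u.length + (1 + v.length) : Nat) : Int)) = v := by
  have hc : ((u.length : Int) + 1) = (((u.length + 1 : Nat)) : Int) := by push_cast; ring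
  rw [hc, PySem.List.slice_natCast]
  have h1 : u ++ x :: (v ++ t) = (u ++ [x]) ++ (v ++ t) := by simp
  rw [h1]
  rw [List.drop_left' (by simp)]
  have h2 : u.length + (1 + v.length) - (u.length + 1) = v.length := by omega
  rw [h2, List.take_left' rfl]

theorem main_ne_aux (a b : String) (hne : a ≠ b) :
    ∀ (n : Nat) (l : List String), l.length ≤ n →
      arcLoop a b l = pairLoop a b (l.filter (pred a b)) := by
  intro n
  induction n with
  | zero =>
    intro l hl
    rw [List.length_eq_zero_iff.mp (Nat.le_zero.mp hl)]
    rw [arcLoop_not_mem a b [] (by simp)]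
    rfl
  | succ n ih =>
    intro l hl
    by_cases ha : a ∈ l
    · by_cases hb : b ∈ l
      · obtain ⟨ma, hma⟩ := Option.isSome_iff_exists.mp ((PySem.List.index?_isSome_iff l a).mpr ha)
        obtain ⟨mb, hmb⟩ := Option.isSome_iff_exists.mp ((PySem.List.index?_isSome_iff l b).mpr hb)
        by_cases hlt : mb < ma
        · -- first B before first A
          rw [arcLoop_b_first a b l ha hb ma mb hma hmb hlt]
          obtain ⟨u, t, rfl, hlen, hbu⟩ := (PySem.List.index?_eq_some_iff _ _ _).mp hmb
          have hau : a ∉ u := fun hmem => by have := idx_mem_pre hma hmem; omega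
          have hat : a ∈ t := by
            rcases List.mem_append.mp ha with h | h
            · exact absurd h hau
            · rcases List.mem_cons.mp h with h | h
              · exact absurd h hne
              · exact h
          have hfil : (u ++ b :: t).filter (pred a b) = b :: t.filter (pred a b) := by
            simp [List.filter_append, filter_pred_nil a b u hau hbu, pred]
          rw [hfil]
          exact (pairLoop_head_b a b _ hne (by
            simp [List.mem_filter, pred, hat])).symm
        · -- ma < mb (ma = mb impossible)
          obtain ⟨u, t, rfl, hlen, hau⟩ := (PySem.List.index?_eq_some_iff _ _ _).mp hma
          have hbu : b ∉ u := fun hmem => hlt (by have := idx_mem_pre hmb hmem; omega)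
          have hbt : b ∈ t := by
            rcases List.mem_append.mp hb with h | h
            · exact absurd h hbu
            · rcases List.mem_cons.mp h with h | h
              · exact absurd h (Ne.symm hne)
              · exact h
          obtain ⟨v, w, rfl, hkl, hbv⟩ := (PySem.List.index?_eq_some_iff t b _).mp
            (Option.isSome_iff_exists.mp ((PySem.List.index?_isSome_iff t b).mpr hbt)).choose_spec
          -- compute mb
          have hmb' : PySem.List.index? (u ++ a :: (v ++ b :: w)) b = some (u.length + (1 + v.length)) := by
            apply (PySem.List.index?_eq_some_iff _ _ _).mpr
            exact ⟨u ++ a :: v, w, by simp, by simp; omega, by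
              simp only [List.mem_append, List.mem_cons, not_or]
              exact ⟨hbu, Ne.symm hne, hbv⟩⟩
          have hmbe : mb = u.length + (1 + v.length) := by
            rw [hmb] at hmb'; exact Option.some.inj hmb'
          have hsl : PySem.List.slice (u ++ a :: (v ++ b :: w)) (some ((ma : Int) + 1)) (some (mb : Int)) = v := by
            rw [hmbe, ← hlen]
            exact slice_middle u v (b :: w) a
          by_cases hav : a ∈ v
          · rw [arcLoop_a_between a b _ ha hb ma mb hma hmb hlt (by rw [hsl]; exact hav)]
            have hfl : (u ++ a :: (v ++ b :: w)).filter (pred a b)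
                = a :: (v.filter (pred a b) ++ b :: w.filter (pred a b)) := by
              simp [List.filter_append, filter_pred_nil a b u hau hbu, pred]
            rw [hfl]
            have hvmem : a ∈ v.filter (pred a b) := by
              simp [List.mem_filter, pred, hav]
            rcases hfv : v.filter (pred a b) with _ | ⟨x, xs⟩
            · rw [hfv] at hvmem; simp at hvmem
            · have hx : x = a := by
                have : x ∈ v.filter (pred a b) := by rw [hfv]; simp
                have hxv := List.mem_filter.mp this
                rcases (by simpa [pred] using hxv.2 : x = a ∨ x = b) with h | h
                · exact h
                · exact absurd (h ▸ hxv.1) hbv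
              rw [hx]
              simp only [List.cons_append]
              exact (pairLoop_a_a a b _ hne).symm
          · -- continue: pop, pop, recurse
            have hlen1 : ma < (u ++ a :: (v ++ b :: w)).length := by
              simp only [List.length_append, List.length_cons]; omega
            have hp1 := PySem.List.pop?_natCast (u ++ a :: (v ++ b :: w)) ma hlen1
            have he1 : (u ++ a :: (v ++ b :: w)).eraseIdx ma = u ++ (v ++ b :: w) := by
              rw [← hlen, List.eraseIdx_append_of_length_le (le_refl _)]
              simp
            rw [he1] at hp1
            have hc1 : u ++ (v ++ b :: w) = (u ++ v) ++ b :: w := by simp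
            have hj : PySem.List.index? (u ++ (v ++ b :: w)) b = some (u.length + v.length) := by
              rw [hc1]
              apply (PySem.List.index?_eq_some_iff _ _ _).mpr
              exact ⟨u ++ v, w, rfl, by simp, by
                simp only [List.mem_append, not_or]
                exact ⟨hbu, hbv⟩⟩
            have hlen2 : u.length + v.length < (u ++ (v ++ b :: w)).length := by
              simp only [List.length_append, List.length_cons]; omega
            have hp2 := PySem.List.pop?_natCast (u ++ (v ++ b :: w)) (u.length + v.length) hlen2
            have he2 : (u ++ (v ++ b :: w)).eraseIdx (u.length + v.length) = u ++ (v ++ w) := by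
              rw [hc1, List.eraseIdx_append_of_length_le (by simp)]
              simp
            rw [he2] at hp2
            rw [arcLoop_step a b _ ha hb ma mb hma hmb hlt (by rw [hsl]; exact hav)
              _ _ hp1 _ hj _ _ hp2]
            have hfl : (u ++ a :: (v ++ b :: w)).filter (pred a b)
                = a :: b :: w.filter (pred a b) := by
              simp [List.filter_append, filter_pred_nil a b u hau hbu,
                filter_pred_nil a b v hav hbv, pred]
            rw [hfl, pairLoop_pair]
            have hfc2 : (u ++ (v ++ w)).filter (pred a b) = w.filter (pred a b) := by
              simp [List.filter_append, filter_pred_nil a b u hau hbu,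
                filter_pred_nil a b v hav hbv]
            rw [← hfc2]
            apply ih
            simp only [List.length_append, List.length_cons] at hl ⊢
            omega
      · -- b not in l
        rw [arcLoop_no_b a b l ha hb]
        symm
        apply pairLoop_all_a a b _ hne
        · intro hnil
          have : a ∈ l.filter (pred a b) := by
            simp [List.mem_filter, pred, ha]
          rw [hnil] at this; simp at this
        · intro w hw
          have hwf := List.mem_filter.mp hw
          rcases (by simpa [pred] using hwf.2 : w = a ∨ w = b) with h | h
          · exact h
          · exact absurd (h ▸ hwf.1) hb
    · rw [arcLoop_not_mem a b l ha]
      symm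
      apply pairLoop_all_b
      intro w hw
      have hwf := List.mem_filter.mp hw
      rcases (by simpa [pred] using hwf.2 : w = a ∨ w = b) with h | h
      · exact absurd (h ▸ hwf.1) ha
      · exact h

theorem main_eq_aux (a : String) :
    ∀ (n : Nat) (l : List String), l.length ≤ n → List.count a l % 2 = 0 →
      arcLoop a a l = true := by
  intro n
  induction n with
  | zero =>
    intro l hl _
    rw [List.length_eq_zero_iff.mp (Nat.le_zero.mp hl)]
    exact arcLoop_not_mem a a [] (by simp)
  | succ n ih =>
    intro l hl hcnt
    by_cases ha : a ∈ l
    · obtain ⟨ma, hma⟩ := Option.isSome_iff_exists.mp ((PySem.List.index?_isSome_iff l a).mpr ha)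
      obtain ⟨u, t, rfl, hlen, hau⟩ := (PySem.List.index?_eq_some_iff _ _ _).mp hma
      have hcu : List.count a u = 0 := List.count_eq_zero.mpr hau
      have hct : List.count a t % 2 = 1 := by
        simp only [List.count_append, List.count_cons_self] at hcnt
        omega
      have hat : a ∈ t := List.count_pos_iff.mp (by omega)
      have hsl : a ∉ PySem.List.slice (u ++ a :: t) (some ((ma : Int) + 1)) (some (ma : Int)) := by
        have hc : ((ma : Int) + 1) = (((ma + 1 : Nat)) : Int) := by push_cast; ring
        rw [hc, PySem.List.slice_natCast]
        simp [Nat.sub_eq_zero_of_le (Nat.le_succ ma)]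
      have hlen1 : ma < (u ++ a :: t).length := by
        simp only [List.length_append, List.length_cons]; omega
      have hp1 := PySem.List.pop?_natCast (u ++ a :: t) ma hlen1
      have he1 : (u ++ a :: t).eraseIdx ma = u ++ t := by
        rw [← hlen, List.eraseIdx_append_of_length_le (le_refl _)]; simp
      rw [he1] at hp1
      have hac1 : a ∈ u ++ t := List.mem_append.mpr (Or.inr hat)
      obtain ⟨j, hj⟩ := Option.isSome_iff_exists.mp ((PySem.List.index?_isSome_iff _ a).mpr hac1)
      obtain ⟨p, q, hpq, hjl, hap⟩ := (PySem.List.index?_eq_some_iff _ _ _).mp hj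
      have hlen2 : j < (u ++ t).length := by
        rw [hpq]; simp only [List.length_append, List.length_cons]; omega
      have hp2 := PySem.List.pop?_natCast (u ++ t) j hlen2
      have he2 : (u ++ t).eraseIdx j = p ++ q := by
        rw [hpq, ← hjl, List.eraseIdx_append_of_length_le (le_refl _)]; simp
      rw [he2] at hp2
      rw [arcLoop_step a a _ ha ha ma ma hma hma (lt_irrefl ma) hsl _ _ hp1 _ hj _ _ hp2]
      have hlpq := congrArg List.length hpq
      have hcpq := congrArg (List.count a) hpq
      simp only [List.length_append, List.length_cons] at hlpq hl ⊢
      simp only [List.count_append, List.count_cons_self] at hcpq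
      apply ih
      · simp only [List.length_append]; omega
      · simp only [List.count_append]; omega
    · exact arcLoop_not_mem a a l ha

theorem top_eq_arcLoop (a b : String) (l : List String) :
    alternate_response_check_py a b l = arcLoop a b l := by
  unfold alternate_response_check_py
  by_cases h1 : a ∈ l
  · by_cases h2 : b ∈ l
    · rw [if_neg (not_not_intro h1), if_neg (by simp [h2])]
    · rw [if_neg (not_not_intro h1), if_pos ⟨h1, h2⟩]
      exact (arcLoop_no_b a b l h1 h2).symm
  · rw [if_pos h1]
    exact (arcLoop_not_mem a b l h1).symm

-- ===== VERDICT (by name: the statement is the Claim_ definition above) =====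
theorem alternate_response_check_py_spec : Claim_equal_alternate_response_check_py := by
  intro a b l _ hpre
  unfold Spec_alternate_response_check_py alternate_response_check_py_alt
  rw [top_eq_arcLoop]
  have hpp : (fun w => w == a || w == b) = pred a b := rfl
  rw [hpp]
  by_cases heq : a = b
  · subst heq
    have hcnt : List.count a l % 2 = 0 := by
      unfold Pre_alternate_response_check_py at hpre
      rw [PySem.List.count_eq] at hpre
      have h2 : ¬ (List.count a l % 2 = 1) := fun h => hpre ⟨rfl, h⟩
      omega
    rw [main_eq_aux a l.length l (le_refl _) hcnt]
    symm
    apply pairLoop_all_b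
    intro w hw
    have hwf := List.mem_filter.mp hw
    simpa [pred] using hwf.2
  · exact main_ne_aux a b heq l.length l (le_refl _)
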